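-- pv_equiv track=rewrite | github.com/seatgeek/haldane | haldane/views.py | sort_by_group
-- ===== SOURCE A (Python) =====
-- def sort_by_group(nodes, group=None):
--     groups = {
--         'None': {}
--     }
--     for name, node in nodes.items():
--         if node.get('group') is None:
--             groups['None'][name] = node
--         else:
--             if node.get('group') not in groups:
--                 groups[node.get('group')] = {}
--             groups[node.get('group')][name] = node
--
--     if group is not None:
--         if group in groups:
--             groups = {group: groups[group]}
--         else:
--             groups = {}
--
--     return groups
-- ===== SOURCE B (Python) =====
-- def sort_by_group(nodes, group=None):
--     def keyfn(node):
--         g = node.get('group')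
--         return 'None' if g is None else g
--
--     def bucket(k):
--         return {name: node for name, node in nodes.items() if keyfn(node) == k}
--
--     if group is not None:
--         b = bucket(group)
--         return {group: b} if b else {}
--
--     keys = ['None']
--     for node in nodes.values():
--         k = keyfn(node)
--         if k not in keys:
--             keys.append(k)
--     return {k: bucket(k) for k in keys}
-- ===== Notes on version B (the rewrite author's own statement) =====
-- stated objective: alternative
-- what changed: B replaces A's single pass threading a dict-of-dicts with a per-key decomposition: a key function plus a filtering comprehension building one bucket per key; when a group is requested it builds only that bucket and returns it iff non-empty.
-- intended difference: When group == 'None' is requested and no node is ungrouped (and none has group string 'None'), A returns {'None': {}} only because its accumulator pre-seeds an empty 'None' bucket, while B uniformly returns {} for any requested group with no members, which is the intended behaviour. — e.g. on sort_by_group([("x", [("group", "a")])], some "None"): A returns [("None", [])], B returns []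
import Mathlib
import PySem

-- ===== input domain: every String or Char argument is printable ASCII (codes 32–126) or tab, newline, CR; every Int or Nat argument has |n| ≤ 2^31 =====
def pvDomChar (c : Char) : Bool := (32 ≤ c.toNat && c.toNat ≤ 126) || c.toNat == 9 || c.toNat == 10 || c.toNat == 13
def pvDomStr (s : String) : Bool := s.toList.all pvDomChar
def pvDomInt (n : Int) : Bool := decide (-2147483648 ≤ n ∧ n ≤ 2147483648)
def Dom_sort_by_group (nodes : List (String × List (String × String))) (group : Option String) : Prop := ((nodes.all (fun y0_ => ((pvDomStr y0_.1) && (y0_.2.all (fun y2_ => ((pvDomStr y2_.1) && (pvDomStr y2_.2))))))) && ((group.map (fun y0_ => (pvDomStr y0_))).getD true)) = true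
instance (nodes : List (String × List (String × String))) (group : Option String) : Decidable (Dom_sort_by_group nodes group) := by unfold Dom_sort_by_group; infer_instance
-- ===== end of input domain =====

-- B groups by a per-key decomposition (key function + one filtering comprehension per key) instead
-- of A's single pass threading a dict of dicts; on a requested group with no members B returns {}
-- uniformly, where A's pre-seeded accumulator makes it return {'None': {}} for group='None' (D_ below).

-- ===== PORT A =====
def pvGroups0 : PySem.Dict String (PySem.Dict String (List (String × String))) :=
  PySem.Dict.mk [("None", PySem.Dict.mk [])]

-- one iteration of A's `for name, node in nodes.items()` loop body
def pvABody (groups : PySem.Dict String (PySem.Dict String (List (String × String))))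
    (p : String × List (String × String)) :
    PySem.Dict String (PySem.Dict String (List (String × String))) :=
  match (PySem.Dict.mk p.2).get? "group" with
  | none => groups.modify "None" (PySem.Dict.mk []) (fun b => b.insert p.1 p.2)
  | some g =>
      let groups := if groups.contains g then groups else groups.insert g (PySem.Dict.mk [])
      groups.modify g (PySem.Dict.mk []) (fun b => b.insert p.1 p.2)

def sort_by_group (nodes : List (String × List (String × String))) (group : Option String) :
    List (String × List (String × List (String × String))) :=
  let groups := nodes.foldl pvABody pvGroups0
  let groups2 :=
    match group with
    | none => groups
    | some g =>
        match groups.get? g with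
        | some b => PySem.Dict.mk [(g, b)]
        | none => PySem.Dict.mk []
  groups2.items.map (fun q => (q.1, q.2.items))

-- ===== PORT B =====
-- keyfn: a node's group, with a missing/None group rendered as the string "None"
def pvKey (node : List (String × String)) : String :=
  match (PySem.Dict.mk node).get? "group" with
  | none => "None"
  | some g => g

-- bucket(k) = {name: node for name, node in nodes.items() if keyfn(node) == k}
def pvBucket (nodes : List (String × List (String × String))) (k : String) :
    PySem.Dict String (List (String × String)) :=
  nodes.foldl (fun d p => if pvKey p.2 = k then d.insert p.1 p.2 else d) (PySem.Dict.mk [])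

-- keys: 'None' first, then the other group names in order of first appearance
def pvKeys (nodes : List (String × List (String × String))) : List String :=
  nodes.foldl (fun ks p => if pvKey p.2 ∈ ks then ks else ks ++ [pvKey p.2]) ["None"]

def sort_by_group_alt (nodes : List (String × List (String × String))) (group : Option String) :
    List (String × List (String × List (String × String))) :=
  match group with
  | some g =>
      let b := pvBucket nodes g
      if b.items ≠ [] then [(g, b.items)] else []
  | none => (pvKeys nodes).map (fun k => (k, (pvBucket nodes k).items))

-- ===== PRECONDITION & SPEC =====
-- When group == "None" is requested and no node is ungrouped (nor carries group string "None"),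
-- A returns {'None': {}} only because its accumulator pre-seeds that bucket, while B uniformly
-- returns {} for any requested group with no members, which is the intended behaviour.
def D_sort_by_group (nodes : List (String × List (String × String))) (group : Option String) : Prop :=
  group = some "None" ∧ ∀ p ∈ nodes,
    (PySem.Dict.mk p.2).get? "group" ≠ none ∧ (PySem.Dict.mk p.2).get? "group" ≠ some "None"
instance (nodes : List (String × List (String × String))) (group : Option String) : Decidable (D_sort_by_group nodes group) := by unfold D_sort_by_group; infer_instance

def Spec_sort_by_group (nodes : List (String × List (String × String))) (group : Option String) (out : List (String × List (String × List (String × String)))) : Prop := ¬ D_sort_by_group nodes group → out = sort_by_group_alt nodes group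
instance (nodes : List (String × List (String × String))) (group : Option String) (out : List (String × List (String × List (String × String)))) : Decidable (Spec_sort_by_group nodes group out) := by unfold Spec_sort_by_group; infer_instance

def pvDiffWitness_sort_by_group : (List (String × List (String × String))) × Option String :=
  ([("x", [("group", "a")])], some "None")
def pvDiffWitnessOut_sort_by_group : (List (String × List (String × List (String × String)))) × (List (String × List (String × List (String × String)))) :=
  ([("None", [])], [])

-- ===== CLAIM (what is proved, stated in full; the proofs are below) =====
def Claim_unchanged_sort_by_group : Prop := ∀ (nodes : List (String × List (String × String))) (group : Option String), Dom_sort_by_group nodes group → Spec_sort_by_group nodes group (sort_by_group nodes group)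
def Claim_changed_sort_by_group : Prop := Dom_sort_by_group (pvDiffWitness_sort_by_group.1) (pvDiffWitness_sort_by_group.2) ∧ D_sort_by_group (pvDiffWitness_sort_by_group.1) (pvDiffWitness_sort_by_group.2) ∧ sort_by_group (pvDiffWitness_sort_by_group.1) (pvDiffWitness_sort_by_group.2) = pvDiffWitnessOut_sort_by_group.1 ∧ sort_by_group_alt (pvDiffWitness_sort_by_group.1) (pvDiffWitness_sort_by_group.2) = pvDiffWitnessOut_sort_by_group.2 ∧ pvDiffWitnessOut_sort_by_group.1 ≠ pvDiffWitnessOut_sort_by_group.2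
def Claim_exact_sort_by_group : Prop := ∀ (nodes : List (String × List (String × String))) (group : Option String), Dom_sort_by_group nodes group → D_sort_by_group nodes group → sort_by_group nodes group ≠ sort_by_group_alt nodes group

-- ===== LEMMAS AND PROOFS =====

theorem contains_mk_map {ν : Type} (keys : List String) (f : String → ν) (k0 : String) :
    (PySem.Dict.mk (keys.map (fun k => (k, f k)))).contains k0 = decide (k0 ∈ keys) := by
  induction keys with
  | nil => simp [PySem.Dict.contains]
  | cons a l ih =>
      simp only [PySem.Dict.contains, List.map_cons, List.any_cons] at ih ⊢
      rw [ih]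
      by_cases h : a = k0
      · subst h
        simp
      · have h1 : (a == k0) = false := by simp [h]
        have h2 : decide (k0 ∈ a :: l) = decide (k0 ∈ l) := by
          simp [List.mem_cons, Ne.symm h]
        rw [h1, h2]
        simp

theorem get?_mk_map {ν : Type} (keys : List String) (f : String → ν) (k0 : String) :
    (PySem.Dict.mk (keys.map (fun k => (k, f k)))).get? k0
      = if k0 ∈ keys then some (f k0) else none := by
  induction keys with
  | nil => simp [PySem.Dict.get?]
  | cons a l ih =>
      rw [List.map_cons, PySem.Dict.get?_mk_cons]
      by_cases h : a = k0
      · simp [h]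
      · simp [h, ih, Ne.symm h]

theorem modify_mk_map {ν : Type} (keys : List String) (f : String → ν) (k0 : String)
    (h : k0 ∈ keys) (d0 : ν) (g : ν → ν) :
    (PySem.Dict.mk (keys.map (fun k => (k, f k)))).modify k0 d0 g
      = PySem.Dict.mk (keys.map (fun k => (k, if k = k0 then g (f k) else f k))) := by
  have hc := contains_mk_map keys f k0
  have hg := get?_mk_map keys f k0
  simp [PySem.Dict.modify, PySem.Dict.insert, hc, h, PySem.Dict.getD_eq_get?_getD, hg]
  intro k _
  by_cases hk : k = k0 <;> simp [hk]

theorem insert_mk_map_not_mem {ν : Type} (keys : List String) (f : String → ν) (k0 : String)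
    (h : k0 ∉ keys) (v : ν) :
    (PySem.Dict.mk (keys.map (fun k => (k, f k)))).insert k0 v
      = PySem.Dict.mk (keys.map (fun k => (k, f k)) ++ [(k0, v)]) := by
  simp [PySem.Dict.insert, h]

theorem insert_items_ne_nil {κ ν : Type} [BEq κ] (d : PySem.Dict κ ν) (k : κ) (v : ν) :
    (d.insert k v).items ≠ [] := by
  simp only [PySem.Dict.insert]
  split
  · rename_i h
    simp only [PySem.Dict.contains, List.any_eq_true] at h
    rcases h with ⟨p, hp, _⟩
    simp only [ne_eq, List.map_eq_nil_iff]
    intro hnil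
    rw [hnil] at hp
    exact absurd hp List.not_mem_nil
  · simp

theorem mem_keysAux (l : List (String × List (String × String))) (ks : List String) (k : String) :
    k ∈ l.foldl (fun ks p => if pvKey p.2 ∈ ks then ks else ks ++ [pvKey p.2]) ks
      ↔ k ∈ ks ∨ ∃ p ∈ l, pvKey p.2 = k := by
  induction l generalizing ks with
  | nil => simp
  | cons a l ih =>
      rw [List.foldl_cons]
      by_cases h : pvKey a.2 ∈ ks
      · rw [if_pos h, ih]
        constructor
        · rintro (hk | ⟨p, hp, hpk⟩)
          · exact Or.inl hk
          · exact Or.inr ⟨p, List.mem_cons_of_mem _ hp, hpk⟩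
        · rintro (hk | ⟨p, hp, hpk⟩)
          · exact Or.inl hk
          · rcases List.mem_cons.1 hp with rfl | hp'
            · exact Or.inl (hpk ▸ h)
            · exact Or.inr ⟨p, hp', hpk⟩
      · rw [if_neg h, ih]
        constructor
        · rintro (hk | ⟨p, hp, hpk⟩)
          · rcases List.mem_append.1 hk with hk' | hk'
            · exact Or.inl hk'
            · exact Or.inr ⟨a, by simp, (List.mem_singleton.1 hk').symm⟩
          · exact Or.inr ⟨p, List.mem_cons_of_mem _ hp, hpk⟩
        · rintro (hk | ⟨p, hp, hpk⟩)
          · exact Or.inl (List.mem_append.2 (Or.inl hk))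
          · rcases List.mem_cons.1 hp with rfl | hp'
            · exact Or.inl (List.mem_append.2 (Or.inr (by simp [hpk])))
            · exact Or.inr ⟨p, hp', hpk⟩

theorem bucket_items_nil_iff (l : List (String × List (String × String))) (g : String) :
    (pvBucket l g).items = [] ↔ ∀ q ∈ l, pvKey q.2 ≠ g := by
  have aux : ∀ (l : List (String × List (String × String)))
      (d : PySem.Dict String (List (String × String))),
      (l.foldl (fun d p => if pvKey p.2 = g then d.insert p.1 p.2 else d) d).items = []
        ↔ d.items = [] ∧ ∀ q ∈ l, pvKey q.2 ≠ g := by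
    intro l
    induction l with
    | nil => simp
    | cons a l ih =>
        intro d
        rw [List.foldl_cons]
        by_cases h : pvKey a.2 = g
        · rw [if_pos h, ih]
          constructor
          · rintro ⟨hi, _⟩
            exact absurd hi (insert_items_ne_nil d a.1 a.2)
          · rintro ⟨_, hall⟩
            exact absurd h (hall a (by simp))
        · rw [if_neg h, ih]
          constructor
          · rintro ⟨hi, hall⟩
            refine ⟨hi, fun q hq => ?_⟩
            rcases List.mem_cons.1 hq with rfl | hq'
            · exact h
            · exact hall q hq'
          · rintro ⟨hi, hall⟩
            exact ⟨hi, fun q hq => hall q (List.mem_cons_of_mem _ hq)⟩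
  rw [pvBucket, aux]
  simp

-- ¬D_ at group = "None" produces a node in the None bucket
theorem key_none_of_not_D (nodes : List (String × List (String × String)))
    (h : ¬ D_sort_by_group nodes (some "None")) :
    ∃ p ∈ nodes, pvKey p.2 = "None" := by
  unfold D_sort_by_group at h
  push Not at h
  rcases h (rfl) with ⟨p, hp, hval⟩
  refine ⟨p, hp, ?_⟩
  unfold pvKey
  rcases hg : (PySem.Dict.mk p.2).get? "group" with _ | g
  · simp
  · rw [hg] at hval
    have := hval (by simp)
    simpa using this

theorem pvLoop_eq (nodes : List (String × List (String × String))) :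
    nodes.foldl pvABody pvGroups0
      = PySem.Dict.mk ((pvKeys nodes).map (fun k => (k, pvBucket nodes k))) := by
  induction nodes using List.reverseRecOn with
  | nil => rfl
  | append_singleton l p ih =>
      rw [List.foldl_append, List.foldl_cons, List.foldl_nil, ih]
      have hkeys : pvKeys (l ++ [p])
          = if pvKey p.2 ∈ pvKeys l then pvKeys l else pvKeys l ++ [pvKey p.2] := by
        simp [pvKeys, List.foldl_append]
      have hbucket : ∀ k, pvBucket (l ++ [p]) k
          = if pvKey p.2 = k then (pvBucket l k).insert p.1 p.2 else pvBucket l k := by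
        intro k; simp [pvBucket, List.foldl_append]
      have hNone : "None" ∈ pvKeys l := by
        rw [pvKeys, mem_keysAux]; simp
      by_cases hmem : pvKey p.2 ∈ pvKeys l
      · -- the node's group is already a key: A modifies that bucket in place
        have hstep : pvABody (PySem.Dict.mk ((pvKeys l).map (fun k => (k, pvBucket l k)))) p
            = PySem.Dict.mk ((pvKeys l).map
                (fun k => (k, if k = pvKey p.2 then (pvBucket l k).insert p.1 p.2
                              else pvBucket l k))) := by
          rcases hget : (PySem.Dict.mk p.2).get? "group" with _ | g
          · have hk : pvKey p.2 = "None" := by simp [pvKey, hget]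
            simp only [pvABody, hget]
            rw [hk] at hmem ⊢
            exact modify_mk_map _ _ _ hmem _ _
          · have hk : pvKey p.2 = g := by simp [pvKey, hget]
            simp only [pvABody, hget]
            rw [hk] at hmem ⊢
            rw [if_pos (by rw [contains_mk_map]; simp [hmem])]
            exact modify_mk_map _ _ _ hmem _ _
        rw [hstep, hkeys, if_pos hmem]
        congr 1
        apply List.map_congr_left
        intro k _
        rw [hbucket k]
        by_cases hk : pvKey p.2 = k
        · simp [hk]
        · have hne : ¬ k = pvKey p.2 := fun h => hk h.symm
          simp [hk, hne]
      · -- a fresh group name: A appends an empty bucket, then fills it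
        have hempty : pvBucket l (pvKey p.2) = PySem.Dict.mk [] := by
          have hnil : (pvBucket l (pvKey p.2)).items = [] := by
            apply (bucket_items_nil_iff l (pvKey p.2)).2
            intro q hq hk
            exact hmem ((mem_keysAux l ["None"] (pvKey p.2)).2 (Or.inr ⟨q, hq, hk⟩))
          apply PySem.Dict.ext
          simpa using hnil
        have hkNone : pvKey p.2 ≠ "None" := fun h => hmem (h ▸ hNone)
        have hstep : pvABody (PySem.Dict.mk ((pvKeys l).map (fun k => (k, pvBucket l k)))) p
            = PySem.Dict.mk (((pvKeys l) ++ [pvKey p.2]).map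
                (fun k => (k, if k = pvKey p.2 then (PySem.Dict.mk []).insert p.1 p.2
                              else pvBucket l k))) := by
          rcases hget : (PySem.Dict.mk p.2).get? "group" with _ | g
          · exact absurd (by simp [pvKey, hget]) hkNone
          · have hk : pvKey p.2 = g := by simp [pvKey, hget]
            simp only [pvABody, hget]
            rw [← hk]
            rw [if_neg (by rw [contains_mk_map]; simp [hmem])]
            rw [insert_mk_map_not_mem _ _ _ hmem]
            have hrw : (pvKeys l).map (fun k => (k, pvBucket l k)) ++ [(pvKey p.2, PySem.Dict.mk [])]
                = ((pvKeys l) ++ [pvKey p.2]).map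
                    (fun k => (k, if k = pvKey p.2 then PySem.Dict.mk [] else pvBucket l k)) := by
              rw [List.map_append]
              congr 1
              · apply List.map_congr_left
                intro k hk'
                have hne : k ≠ pvKey p.2 := fun h => hmem (h ▸ hk')
                simp [hne]
              · simp
            rw [hrw, modify_mk_map _ _ _ (by simp) _ _]
            congr 1
            apply List.map_congr_left
            intro k _
            by_cases hk' : k = pvKey p.2 <;> simp [hk']
        rw [hstep, hkeys, if_neg hmem]
        congr 1
        apply List.map_congr_left
        intro k _
        rw [hbucket k]
        by_cases hk : k = pvKey p.2
        · subst hk; simp [hempty]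
        · have hne : ¬ pvKey p.2 = k := fun h => hk h.symm
          simp [hk, hne]

-- ===== VERDICT (by name: the statements are the Claim_ definitions above) =====
theorem sort_by_group_spec : Claim_unchanged_sort_by_group := by
  intro nodes group _
  unfold Spec_sort_by_group
  intro hnd
  simp only [sort_by_group, pvLoop_eq]
  cases group with
  | none =>
      simp only [sort_by_group_alt]
      simp [List.map_map, Function.comp]
  | some g =>
      simp only [sort_by_group_alt]
      rw [get?_mk_map]
      by_cases hmem : g ∈ pvKeys nodes
      · rw [if_pos hmem]
        have hcond : (pvBucket nodes g).items ≠ [] := by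
          intro hnil
          have hall := (bucket_items_nil_iff nodes g).1 hnil
          rcases (mem_keysAux nodes ["None"] g).1 (by rw [pvKeys] at hmem; exact hmem) with h | ⟨q, hq, hk⟩
          · have hg : g = "None" := by simpa using h
            subst hg
            rcases key_none_of_not_D nodes hnd with ⟨p, hp, hpk⟩
            exact hall p hp hpk
          · exact hall q hq hk
        rw [if_pos hcond]
        rfl
      · rw [if_neg hmem]
        have h1 : ¬ ((pvBucket nodes g).items ≠ []) := by
          intro hne
          apply hne
          apply (bucket_items_nil_iff nodes g).2
          intro q hq hk
          apply hmem
          rw [pvKeys, mem_keysAux]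
          exact Or.inr ⟨q, hq, hk⟩
        rw [if_neg h1]
        rfl

theorem sort_by_group_changed : Claim_changed_sort_by_group := by
  unfold Claim_changed_sort_by_group
  refine ⟨by decide, by decide, by decide, by decide, by decide⟩

theorem sort_by_group_tight : Claim_exact_sort_by_group := by
  intro nodes group _ hd
  obtain ⟨hg, hall⟩ := hd
  subst hg
  have hnil : (pvBucket nodes "None").items = [] := by
    apply (bucket_items_nil_iff nodes "None").2
    intro q hq hk
    rcases hall q hq with ⟨h1, h2⟩
    unfold pvKey at hk
    rcases hg' : (PySem.Dict.mk q.2).get? "group" with _ | g'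
    · exact h1 hg'
    · rw [hg'] at hk
      simp only at hk
      exact h2 (by rw [hg']; simp [hk])
  have hNone : "None" ∈ pvKeys nodes := by rw [pvKeys, mem_keysAux]; simp
  have hA : sort_by_group nodes (some "None") = [("None", [])] := by
    simp only [sort_by_group, pvLoop_eq]
    rw [get?_mk_map, if_pos hNone]
    simp [hnil]
  have hB : sort_by_group_alt nodes (some "None") = [] := by
    simp only [sort_by_group_alt]
    rw [if_neg (by simpa using hnil)]
  rw [hA, hB]
  simp
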